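-- pv_equiv track=rewrite | github.com/chetangarg2101/GFG--Problems | Difficulty: Hard/Circle of strings/circle-of-strings.py | isCircle
-- ===== SOURCE A (Python) =====
-- from collections import defaultdict, deque
--
-- def isCircle(arr):
--     # code here
--     graph = defaultdict(list)
--     in_degree = [0] * 26
--     out_degree = [0] * 26
--
--     def char_to_index(c):
--         return ord(c) - ord('a')
--
--     # Build the graph and degree counts
--     for word in arr:
--         start = char_to_index(word[0])
--         end = char_to_index(word[-1])
--         graph[start].append(end)
--         out_degree[start] += 1
--         in_degree[end] += 1
--
--     # Check if the in-degree and out-degree are the same for each vertex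
--     for i in range(26):
--         if in_degree[i] != out_degree[i]:
--             return 0
--
--     # Function to perform DFS to check connectivity
--     def dfs(v, visited):
--         visited[v] = True
--         for u in graph[v]:
--             if not visited[u]:
--                 dfs(u, visited)
--
--     # Find the first character that has an edge (non-zero degree)
--     start_node = -1
--     for i in range(26):
--         if out_degree[i] > 0:
--             start_node = i
--             break
--
--     # If there's no such node, return 0
--     if start_node == -1:
--         return 0
--
--     # Check if all vertices with non-zero degrees are reachable from start_node
--     visited = [False] * 26
--     dfs(start_node, visited)
--
--     # Check if all non-zero degree vertices are visited
--     for i in range(26):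
--         if out_degree[i] > 0 and not visited[i]:
--             return 0
--
--     # Now check the reverse graph for strong connectivity
--     reverse_graph = defaultdict(list)
--     for i in range(26):
--         for j in graph[i]:
--             reverse_graph[j].append(i)
--
--     visited = [False] * 26
--     dfs(start_node, visited)  # DFS on the reversed graph
--
--     for i in range(26):
--         if out_degree[i] > 0 and not visited[i]:
--             return 0
--
--     # If all conditions are satisfied, return 1
--     return 1
-- ===== SOURCE B (Python) =====
-- def isCircle(arr):
--     out_deg = [0] * 26
--     in_deg = [0] * 26
--     edges = []
--     for w in arr:
--         s = ord(w[0]) - ord('a')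
--         e = ord(w[-1]) - ord('a')
--         out_deg[s] += 1
--         in_deg[e] += 1
--         edges.append((s, e))
--     if in_deg != out_deg:
--         return 0
--     starts = [i for i in range(26) if out_deg[i] > 0]
--     if not starts:
--         return 0
--     seen = {starts[0]}
--     for _ in range(26):
--         seen = seen | {e for s, e in edges if s in seen}
--     return 1 if all(i in seen for i in starts) else 0
-- ===== Notes on version B (the rewrite author's own statement) =====
-- stated objective: simpler
-- what changed: B drops A's adjacency-dict, recursive DFS run twice and the dead reverse-graph build, and instead checks in/out-degree balance by list equality and reachability from the first used letter by a round-based set-saturation fixpoint over the edge list.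
-- outside the precondition, e.g. on isCircle(['Za']): A returns 0, B returns 0; on isCircle(['aG', 'Gb', 'ba']): A returns 0, B returns 1; on isCircle(['']): A raises IndexError, B raises IndexError
import Mathlib
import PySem

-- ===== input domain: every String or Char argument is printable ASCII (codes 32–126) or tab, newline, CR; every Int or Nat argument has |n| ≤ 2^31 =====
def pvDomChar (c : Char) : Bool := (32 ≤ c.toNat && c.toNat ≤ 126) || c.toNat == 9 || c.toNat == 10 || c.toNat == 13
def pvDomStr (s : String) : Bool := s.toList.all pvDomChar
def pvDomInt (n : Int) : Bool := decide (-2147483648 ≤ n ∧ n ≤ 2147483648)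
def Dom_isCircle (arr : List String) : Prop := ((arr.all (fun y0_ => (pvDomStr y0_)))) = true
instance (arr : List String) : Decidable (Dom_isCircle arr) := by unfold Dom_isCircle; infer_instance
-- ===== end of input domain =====

-- B replaces A's recursive DFS (run twice, plus a dead reverse-graph build) by a single round-based
-- set-saturation reachability check over the edge list; objective: simpler, same observable results on Pre_.

-- ===== PORT A =====
def pvA_c2i (c : Char) : Int := (c.toNat : Int) - 97

def pvA_dfs (g : PySem.Dict Int (List Int)) : Nat → Int → List Bool → List Bool
  | 0, _, vis => vis
  | fuel+1, v, vis =>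
    (g.getD v []).foldl
      (fun vis u => if PySem.List.pyGetD vis u true = false then pvA_dfs g fuel u vis else vis)
      (PySem.List.pySetD vis v true)
-- fuel 27 is a totality guard only: the Python dfs recurses only into unvisited vertices of a
-- 26-vertex graph, so nesting depth never exceeds 26 and the guard never truncates.

def isCircle (arr : List String) : Int :=
  let st := arr.foldl (fun st w =>
      match PySem.Str.pyGet? w 0, PySem.Str.pyGet? w (-1) with
      | some c0, some c1 =>
        let s := pvA_c2i c0
        let e := pvA_c2i c1
        (st.1.modify s [] (· ++ [e]),
         PySem.List.pySetD st.2.1 s (PySem.List.pyGetD st.2.1 s 0 + 1),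
         PySem.List.pySetD st.2.2 e (PySem.List.pyGetD st.2.2 e 0 + 1))
      | _, _ => st)  -- word[0]/word[-1] raise IndexError in Python here; such inputs are outside Pre_
    ((PySem.Dict.empty : PySem.Dict Int (List Int)), List.replicate 26 (0:Int), List.replicate 26 (0:Int))
  let graph := st.1
  let out_degree := st.2.1
  let in_degree := st.2.2
  if (PySem.List.pyRange 0 26 1).any (fun i => decide (PySem.List.pyGetD in_degree i 0 ≠ PySem.List.pyGetD out_degree i 0)) then 0
  else
    match (PySem.List.pyRange 0 26 1).find? (fun i => decide (PySem.List.pyGetD out_degree i 0 > 0)) with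
    | none => 0
    | some start_node =>
      let visited := pvA_dfs graph 27 start_node (List.replicate 26 false)
      if (PySem.List.pyRange 0 26 1).any (fun i => decide (PySem.List.pyGetD out_degree i 0 > 0) && (PySem.List.pyGetD visited i false == false)) then 0
      else
        -- A builds reverse_graph but (as in the Python) runs dfs on the ORIGINAL graph again
        let _reverse_graph := (PySem.List.pyRange 0 26 1).foldl
          (fun rg i => (graph.getD i []).foldl (fun rg j => rg.modify j [] (· ++ [i])) rg)
          (PySem.Dict.empty : PySem.Dict Int (List Int))
        let visited2 := pvA_dfs graph 27 start_node (List.replicate 26 false)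
        if (PySem.List.pyRange 0 26 1).any (fun i => decide (PySem.List.pyGetD out_degree i 0 > 0) && (PySem.List.pyGetD visited2 i false == false)) then 0
        else 1

-- ===== PORT B =====
def isCircle_alt (arr : List String) : Int :=
  let st := arr.foldl (fun st w =>
      match PySem.Str.pyGet? w 0 with
      | none => st
      | some c0 =>
        match PySem.Str.pyGet? w (-1) with
        | none => st
        | some c1 =>
          let s : Int := (c0.toNat : Int) - 97
          let e : Int := (c1.toNat : Int) - 97
          (PySem.List.pySetD st.1 s (PySem.List.pyGetD st.1 s 0 + 1),
           PySem.List.pySetD st.2.1 e (PySem.List.pyGetD st.2.1 e 0 + 1),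
           st.2.2 ++ [(s, e)]))  -- w[0]/w[-1] raise IndexError in Python here; such inputs are outside Pre_
    (List.replicate 26 (0:Int), List.replicate 26 (0:Int), ([] : List (Int × Int)))
  let out_deg := st.1
  let in_deg := st.2.1
  let edges := st.2.2
  if in_deg = out_deg then
    let starts := (PySem.List.pyRange 0 26 1).filter (fun i => decide (PySem.List.pyGetD out_deg i 0 > 0))
    match starts with
    | [] => 0
    | s0 :: rest =>
      let seen := (PySem.List.pyRange 0 26 1).foldl
        (fun seen _ => PySem.Set.union seen ((edges.filter (fun p => PySem.Set.contains seen p.1)).map (·.2)))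
        (PySem.Set.ofList [s0])
      if (s0 :: rest).all (fun i => PySem.Set.contains seen i) then 1 else 0
  else 0

-- ===== PRECONDITION & SPEC =====
def pvIsLower (c : Char) : Bool := 97 ≤ c.toNat && c.toNat ≤ 122

-- Pre_ restricts to the problem's natural domain, non-empty lowercase words: outside it A either
-- raises IndexError (empty word, or a first/last character whose 'ord(c) - 97' falls outside
-- [-26, 25]) or returns a value only via accidental negative-index wraparound of 'ord(c) - 97',
-- which aliases degree slots while keeping distinct dict keys.
def Pre_isCircle (arr : List String) : Prop :=
  ∀ w ∈ arr, w.toList ≠ [] ∧ pvIsLower (w.toList.headD 'a') = true ∧ pvIsLower (w.toList.getLastD 'a') = true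
instance (arr : List String) : Decidable (Pre_isCircle arr) := by unfold Pre_isCircle; infer_instance

def pvWitness_isCircle : List String := ["ab", "ba"]

def Spec_isCircle (arr : List String) (out : Int) : Prop := out = isCircle_alt arr
instance (arr : List String) (out : Int) : Decidable (Spec_isCircle arr out) := by unfold Spec_isCircle; infer_instance

-- ===== CLAIM (what is proved, stated in full; the proofs are below) =====
def Claim_equal_isCircle : Prop := ∀ (arr : List String), Dom_isCircle arr → Pre_isCircle arr → Spec_isCircle arr (isCircle arr)

-- ===== LEMMAS AND PROOFS =====

-- ---- the common abstraction: the edge list of the input ----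
def pvPair (w : String) : Option (Int × Int) :=
  match PySem.Str.pyGet? w 0, PySem.Str.pyGet? w (-1) with
  | some c0, some c1 => some (pvA_c2i c0, pvA_c2i c1)
  | _, _ => none

def pvP (arr : List String) : List (Int × Int) := arr.filterMap pvPair

-- ---- small List Bool helpers ----
lemma pvGetD_oob (l : List Bool) (n : Nat) (h : l.length ≤ n) (d : Bool) : l.getD n d = d := by
  simp [List.getD_eq_getElem?_getD, List.getElem?_eq_none (by omega)]

lemma pvGetD_set_ne (l : List Bool) (m n : Nat) (h : n ≠ m) (v : Bool) :
    (l.set m v).getD n false = l.getD n false := by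
  by_cases hn : n < l.length
  · rw [List.getD_eq_getElem _ _ (by simpa using hn), List.getD_eq_getElem _ _ hn]
    simp [List.getElem_set_ne (Ne.symm h)]
  · rw [pvGetD_oob _ _ (by simp; omega), pvGetD_oob _ _ (by omega)]

lemma pvGetD_set_self (l : List Bool) (m : Nat) (h : m < l.length) (v : Bool) :
    (l.set m v).getD m false = v := by
  rw [List.getD_eq_getElem _ _ (by simpa using h)]
  simp

lemma pvSetTrue_pres (l : List Bool) (v : Int) (n : Nat) (h : l.getD n false = true) :
    (PySem.List.pySetD l v true).getD n false = true := by
  unfold PySem.List.pySetD PySem.List.pySet?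
  cases hk : PySem.List.pyIdx? l.length v with
  | none => simpa using h
  | some k =>
    simp only [Option.map_some, Option.getD_some]
    by_cases hnk : n = k
    · subst hnk
      by_cases hn : n < l.length
      · exact pvGetD_set_self l n hn true
      · rw [pvGetD_oob _ _ (by omega)] at h; exact absurd h (by simp)
    · rw [pvGetD_set_ne l k n hnk]; exact h

lemma pvSetD_read (l : List Bool) (v : Int) (n : Nat) (hv : 0 ≤ v)
    (h : (PySem.List.pySetD l v true).getD n false = true) :
    l.getD n false = true ∨ n = v.toNat := by
  rw [PySem.List.pySetD_of_nonneg l true hv] at h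
  by_cases hnk : n = v.toNat
  · exact Or.inr hnk
  · rw [pvGetD_set_ne l v.toNat n hnk] at h; exact Or.inl h

lemma pvFcPos (l : List Bool) (n : Nat) (hn : n < l.length) (hf : l.getD n false = false) :
    0 < l.count false := by
  have hm : false ∈ l := by
    rw [List.getD_eq_getElem l false hn] at hf
    exact hf ▸ List.getElem_mem hn
  exact List.count_pos_iff.mpr hm

lemma pvCountLe (l1 : List Bool) : ∀ (l2 : List Bool), l1.length = l2.length →
    (∀ n, l1.getD n false = true → l2.getD n false = true) → l2.count false ≤ l1.count false := by
  induction l1 with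
  | nil => intro l2 hlen _; cases l2 <;> simp_all
  | cons a t ih =>
    intro l2 hlen h
    cases l2 with
    | nil => simp at hlen
    | cons b t2 =>
      have h0 : a = true → b = true := h 0
      have ht : t2.count false ≤ t.count false :=
        ih t2 (by simpa using hlen) (fun n hn => h (n+1) hn)
      simp only [List.count_cons]
      cases a with
      | true => rw [h0 rfl]; omega
      | false => cases b <;> simp <;> omega

lemma pvFcSet (l : List Bool) : ∀ (n : Nat), n < l.length → l.getD n false = false →
    (l.set n true).count false < l.count false := by
  induction l with
  | nil => intro n hn; simp at hn
  | cons a t ih =>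
    intro n hn hf
    cases n with
    | zero =>
      have : a = false := hf
      subst this; simp
    | succ m =>
      have := ih m (by simpa using hn) hf
      simp only [List.set_cons_succ, List.count_cons]
      omega

-- ---- DFS characterisation ----
def pvDStep (g : PySem.Dict Int (List Int)) (fuel : Nat) : List Bool → Int → List Bool :=
  fun vis u => if PySem.List.pyGetD vis u true = false then pvA_dfs g fuel u vis else vis

lemma pvA_dfs_succ (g : PySem.Dict Int (List Int)) (fuel : Nat) (v : Int) (vis : List Bool) :
    pvA_dfs g (fuel+1) v vis = (g.getD v []).foldl (pvDStep g fuel) (PySem.List.pySetD vis v true) := rfl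

def pvRG (g : PySem.Dict Int (List Int)) : Int → Int → Prop :=
  Relation.ReflTransGen (fun a b => b ∈ g.getD a [])

lemma pvDfs_len (g : PySem.Dict Int (List Int)) :
    ∀ fuel v vis, (pvA_dfs g fuel v vis).length = vis.length := by
  intro fuel
  induction fuel with
  | zero => intro v vis; rfl
  | succ k ih =>
    intro v vis
    rw [pvA_dfs_succ]
    have aux : ∀ (ns : List Int) (w : List Bool), (ns.foldl (pvDStep g k) w).length = w.length := by
      intro ns
      induction ns with
      | nil => intro w; rfl
      | cons u t iht =>
        intro w
        simp only [List.foldl_cons]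
        rw [iht]
        unfold pvDStep
        split
        · exact ih u w
        · rfl
    rw [aux]
    exact PySem.List.length_pySetD vis v true

lemma pvDfs_mono (g : PySem.Dict Int (List Int)) :
    ∀ fuel v vis n, vis.getD n false = true → (pvA_dfs g fuel v vis).getD n false = true := by
  intro fuel
  induction fuel with
  | zero => intro v vis n h; exact h
  | succ k ih =>
    intro v vis n h
    rw [pvA_dfs_succ]
    have aux : ∀ (ns : List Int) (w : List Bool), w.getD n false = true →
        (ns.foldl (pvDStep g k) w).getD n false = true := by
      intro ns
      induction ns with
      | nil => intro w hw; exact hw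
      | cons u t iht =>
        intro w hw
        simp only [List.foldl_cons]
        apply iht
        unfold pvDStep
        split
        · exact ih u w n hw
        · exact hw
    exact aux _ _ (pvSetTrue_pres vis v n h)

lemma pvFold_mono (g : PySem.Dict Int (List Int)) (fuel : Nat) :
    ∀ (ns : List Int) (vis : List Bool) (n : Nat), vis.getD n false = true →
      (ns.foldl (pvDStep g fuel) vis).getD n false = true := by
  intro ns
  induction ns with
  | nil => intro vis n h; exact h
  | cons u t iht =>
    intro vis n h
    simp only [List.foldl_cons]
    apply iht
    unfold pvDStep
    split
    · exact pvDfs_mono g fuel u vis n h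
    · exact h

lemma pvDfs_fc_le (g : PySem.Dict Int (List Int)) (fuel : Nat) (v : Int) (vis : List Bool) :
    (pvA_dfs g fuel v vis).count false ≤ vis.count false := by
  apply pvCountLe
  · exact (pvDfs_len g fuel v vis).symm
  · intro n hn; exact pvDfs_mono g fuel v vis n hn

lemma pvDfs_marks (g : PySem.Dict Int (List Int)) (k : Nat) (v : Int) (vis : List Bool)
    (hv0 : 0 ≤ v) (hv : v.toNat < vis.length) :
    (pvA_dfs g (k+1) v vis).getD v.toNat false = true := by
  rw [pvA_dfs_succ]
  apply pvFold_mono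
  rw [PySem.List.pySetD_of_nonneg vis true hv0]
  exact pvGetD_set_self vis v.toNat hv true

lemma pvRepRead (m : Nat) : (List.replicate 26 false).getD m false = false := by
  rw [List.getD_eq_getElem?_getD, List.getElem?_replicate]
  split <;> rfl

lemma pvDfs_sound (g : PySem.Dict Int (List Int))
    (hg : ∀ v u, u ∈ g.getD v [] → 0 ≤ u ∧ u < 26) :
    ∀ fuel v vis n, 0 ≤ v → (pvA_dfs g fuel v vis).getD n false = true →
      vis.getD n false = true ∨ pvRG g v (n : Int) := by
  intro fuel
  induction fuel with
  | zero => intro v vis n _ h; exact Or.inl h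
  | succ k ih =>
    intro v vis n hv h
    rw [pvA_dfs_succ] at h
    have aux : ∀ (ns : List Int), (∀ u ∈ ns, u ∈ g.getD v []) →
        ∀ (w : List Bool), (ns.foldl (pvDStep g k) w).getD n false = true →
          w.getD n false = true ∨ ∃ u ∈ ns, pvRG g u (n : Int) := by
      intro ns
      induction ns with
      | nil => intro _ w hw; exact Or.inl hw
      | cons u t iht =>
        intro hns w hw
        simp only [List.foldl_cons] at hw
        rcases iht (fun x hx => hns x (List.mem_cons_of_mem u hx)) _ hw with hw' | ⟨u', hu', hr⟩
        · unfold pvDStep at hw'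
          split at hw'
          · rcases ih u w n (hg v u (hns u (List.mem_cons_self ..))).1 hw' with h1 | h2
            · exact Or.inl h1
            · exact Or.inr ⟨u, List.mem_cons_self .., h2⟩
          · exact Or.inl hw'
        · exact Or.inr ⟨u', List.mem_cons_of_mem u hu', hr⟩
    rcases aux _ (fun _ hx => hx) _ h with h1 | ⟨u, hu, hr⟩
    · rcases pvSetD_read vis v n hv h1 with h2 | h2
      · exact Or.inl h2
      · right
        have : (n : Int) = v := by omega
        rw [this]
        exact Relation.ReflTransGen.refl
    · exact Or.inr (Relation.ReflTransGen.head hu hr)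

lemma pvFoldVisitsAll (g : PySem.Dict Int (List Int)) (k : Nat) :
    ∀ (ns : List Int), (∀ u ∈ ns, 0 ≤ u ∧ u < 26) →
    ∀ (w : List Bool), w.length = 26 → w.count false ≤ k →
    ∀ u ∈ ns, (ns.foldl (pvDStep g k) w).getD u.toNat false = true := by
  intro ns
  induction ns with
  | nil => intro _ w _ _ u hu; cases hu
  | cons u t iht =>
    intro hns w hw26 hwk x hx
    simp only [List.foldl_cons]
    have hstep_cases : pvDStep g k w u = pvA_dfs g k u w ∨ pvDStep g k w u = w := by
      unfold pvDStep; split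
      · exact Or.inl rfl
      · exact Or.inr rfl
    have hw'26 : (pvDStep g k w u).length = 26 := by
      rcases hstep_cases with h | h <;> rw [h]
      · rw [pvDfs_len]; exact hw26
      · exact hw26
    have hw'k : (pvDStep g k w u).count false ≤ k := by
      rcases hstep_cases with h | h <;> rw [h]
      · exact le_trans (pvDfs_fc_le g k u w) hwk
      · exact hwk
    rcases List.mem_cons.mp hx with rfl | hx'
    · apply pvFold_mono
      have hu' := hns x (List.mem_cons_self ..)
      unfold pvDStep
      split
      · rename_i hguard
        have hread : w.getD x.toNat false = false := by
          rw [List.getD_eq_getElem w false (by omega),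
              ← PySem.List.pyGetD_eq_getElem w true hu'.1 (by omega)]
          exact hguard
        have hk1 : 0 < k := lt_of_lt_of_le (pvFcPos w x.toNat (by omega) hread) hwk
        obtain ⟨k', rfl⟩ : ∃ k', k = k' + 1 := ⟨k - 1, by omega⟩
        exact pvDfs_marks g k' x w hu'.1 (by omega)
      · rename_i hguard
        have hu2 := hns x (List.mem_cons_self ..)
        rw [List.getD_eq_getElem w false (by omega),
            ← PySem.List.pyGetD_eq_getElem w true hu2.1 (by omega)]
        simpa using hguard
    · exact iht (fun y hy => hns y (List.mem_cons_of_mem u hy)) _ hw'26 hw'k x hx'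

lemma pvDfs_closed (g : PySem.Dict Int (List Int))
    (hg : ∀ v u, u ∈ g.getD v [] → 0 ≤ u ∧ u < 26) :
    ∀ fuel v vis, vis.length = 26 → 0 ≤ v → v < 26 →
      vis.getD v.toNat false = false → vis.count false ≤ fuel →
      ∀ a : Int, 0 ≤ a → a < 26 → (pvA_dfs g fuel v vis).getD a.toNat false = true →
        vis.getD a.toNat false = true ∨
          ∀ u, u ∈ g.getD a [] → (pvA_dfs g fuel v vis).getD u.toNat false = true := by
  intro fuel
  induction fuel with
  | zero =>
    intro v vis h26 hv0 hv26 hunv hfc a _ _ _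
    exact absurd (pvFcPos vis v.toNat (by omega) hunv) (by omega)
  | succ k ih =>
    intro v vis h26 hv0 hv26 hunv hfc a ha0 ha26 hres
    rw [pvA_dfs_succ] at hres ⊢
    have hv1eq : PySem.List.pySetD vis v true = vis.set v.toNat true :=
      PySem.List.pySetD_of_nonneg vis true hv0
    have hlen1 : (PySem.List.pySetD vis v true).length = 26 := by
      rw [hv1eq, List.length_set]; exact h26
    have hfc1 : (PySem.List.pySetD vis v true).count false ≤ k := by
      have := pvFcSet vis v.toNat (by omega) hunv
      rw [← hv1eq] at this; omega
    have hns : ∀ u ∈ g.getD v [], 0 ≤ u ∧ u < 26 := fun u hu => hg v u hu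
    have aux : ∀ (ns : List Int), (∀ u ∈ ns, 0 ≤ u ∧ u < 26) →
        ∀ (w : List Bool), w.length = 26 → w.count false ≤ k →
        ∀ b : Int, 0 ≤ b → b < 26 → (ns.foldl (pvDStep g k) w).getD b.toNat false = true →
          w.getD b.toNat false = true ∨
            ∀ u, u ∈ g.getD b [] → (ns.foldl (pvDStep g k) w).getD u.toNat false = true := by
      intro ns
      induction ns with
      | nil => intro _ w _ _ b _ _ hb; exact Or.inl hb
      | cons u t iht =>
        intro hnsb w hw26 hwk b hb0 hb26 hb
        simp only [List.foldl_cons] at hb ⊢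
        have hu := hnsb u (List.mem_cons_self ..)
        have hstep_cases : pvDStep g k w u = pvA_dfs g k u w ∨ pvDStep g k w u = w := by
          unfold pvDStep; split
          · exact Or.inl rfl
          · exact Or.inr rfl
        have hw'26 : (pvDStep g k w u).length = 26 := by
          rcases hstep_cases with h | h <;> rw [h]
          · rw [pvDfs_len]; exact hw26
          · exact hw26
        have hw'k : (pvDStep g k w u).count false ≤ k := by
          rcases hstep_cases with h | h <;> rw [h]
          · exact le_trans (pvDfs_fc_le g k u w) hwk
          · exact hwk
        rcases iht (fun y hy => hnsb y (List.mem_cons_of_mem u hy)) _ hw'26 hw'k b hb0 hb26 hb with h1 | h2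
        · by_cases hcase : PySem.List.pyGetD w u true = false
          · have hstep : pvDStep g k w u = pvA_dfs g k u w := by
              unfold pvDStep; rw [if_pos hcase]
            rw [hstep] at h1
            have hwuread : w.getD u.toNat false = false := by
              rw [List.getD_eq_getElem w false (by omega),
                  ← PySem.List.pyGetD_eq_getElem w true hu.1 (by omega)]
              exact hcase
            rcases ih u w hw26 hu.1 hu.2 hwuread hwk b hb0 hb26 h1 with h3 | h4
            · exact Or.inl h3
            · right
              intro u' hu'
              apply pvFold_mono
              rw [hstep]
              exact h4 u' hu'
          · have hstep : pvDStep g k w u = w := by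
              unfold pvDStep; rw [if_neg hcase]
            rw [hstep] at h1
            exact Or.inl h1
        · exact Or.inr h2
    rcases aux _ hns _ hlen1 hfc1 a ha0 ha26 hres with h1 | h2
    · rw [hv1eq] at h1
      by_cases hav : a.toNat = v.toNat
      · have hav' : a = v := by omega
        subst hav'
        right
        intro u hu
        exact pvFoldVisitsAll g k _ hns _ hlen1 hfc1 u hu
      · rw [pvGetD_set_ne vis v.toNat a.toNat hav] at h1
        exact Or.inl h1
    · exact Or.inr h2

lemma pvDfs_char (g : PySem.Dict Int (List Int))
    (hg : ∀ v u, u ∈ g.getD v [] → 0 ≤ u ∧ u < 26)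
    (s0 : Int) (h0 : 0 ≤ s0) (h26 : s0 < 26) :
    ∀ i : Int, 0 ≤ i → i < 26 →
      ((pvA_dfs g 27 s0 (List.replicate 26 false)).getD i.toNat false = true ↔ pvRG g s0 i) := by
  have compl : ∀ j : Int, pvRG g s0 j →
      (0 ≤ j ∧ j < 26) ∧ (pvA_dfs g 27 s0 (List.replicate 26 false)).getD j.toNat false = true := by
    intro j hj
    induction hj with
    | refl =>
      exact ⟨⟨h0, h26⟩, pvDfs_marks g 26 s0 _ h0 (by rw [List.length_replicate]; omega)⟩
    | tail hab hbc ihp =>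
      obtain ⟨⟨hb0, hb26⟩, hbres⟩ := ihp
      have hc := hg _ _ hbc
      refine ⟨hc, ?_⟩
      rcases pvDfs_closed g hg 27 s0 (List.replicate 26 false) (List.length_replicate ..)
          h0 h26 (pvRepRead _) (by rw [List.count_replicate]; simp) _ hb0 hb26 hbres with h1 | h2
      · rw [pvRepRead] at h1; cases h1
      · exact h2 _ hbc
  intro i h0i h26i
  constructor
  · intro h
    rcases pvDfs_sound g hg 27 s0 _ i.toNat h0 h with h1 | h1
    · rw [pvRepRead] at h1; cases h1
    · rwa [Int.toNat_of_nonneg h0i] at h1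
  · intro h
    exact (compl i h).2

-- ---- saturation characterisation ----
def pvSatF (P : List (Int × Int)) (s : PySem.Set Int) : PySem.Set Int :=
  PySem.Set.union s ((P.filter (fun p => PySem.Set.contains s p.1)).map (·.2))

def pvRP (P : List (Int × Int)) : Int → Int → Prop :=
  Relation.ReflTransGen (fun a b => (a, b) ∈ P)

lemma pvSat_sound (P : List (Int × Int)) (s0 : Int) :
    ∀ k x, x ∈ (pvSatF P)^[k] (PySem.Set.ofList [s0]) → pvRP P s0 x := by
  intro k
  induction k with
  | zero =>
    intro x hx
    have : x = s0 := by simpa [PySem.Set.mem_ofList] using hx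
    rw [this]
    exact Relation.ReflTransGen.refl
  | succ m ih =>
    intro x hx
    rw [Function.iterate_succ_apply'] at hx
    unfold pvSatF at hx
    rcases (PySem.Set.mem_union _ _ _).mp hx with h1 | h1
    · exact ih x h1
    · obtain ⟨p, hp, hpx⟩ := List.mem_map.mp h1
      have hpf := List.mem_filter.mp hp
      have hp1 : p.1 ∈ (pvSatF P)^[m] (PySem.Set.ofList [s0]) :=
        (PySem.Set.contains_iff _ _).mp hpf.2
      refine Relation.ReflTransGen.tail (ih p.1 hp1) ?_
      have : (p.1, x) = p := by rw [← hpx]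
      rw [this]
      exact hpf.1

lemma pvSat_complete (P : List (Int × Int)) (s0 : Int)
    (hP : ∀ p ∈ P, (0 ≤ p.1 ∧ p.1 < 26) ∧ (0 ≤ p.2 ∧ p.2 < 26)) (h0 : 0 ≤ s0) (h26 : s0 < 26) :
    ∀ x, pvRP P s0 x → x ∈ (pvSatF P)^[26] (PySem.Set.ofList [s0]) := by
  -- invariants of the saturation iteration
  have hnodup : ∀ k, ((pvSatF P)^[k] (PySem.Set.ofList [s0])).Nodup := by
    intro k
    induction k with
    | zero => exact PySem.Set.nodup_ofList [s0]
    | succ m ih =>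
      rw [Function.iterate_succ_apply']
      exact PySem.Set.nodup_update _ _ ih
  have hbound : ∀ k x, x ∈ (pvSatF P)^[k] (PySem.Set.ofList [s0]) → 0 ≤ x ∧ x < 26 := by
    intro k
    induction k with
    | zero =>
      intro x hx
      have : x = s0 := by simpa [PySem.Set.mem_ofList] using hx
      rw [this]; exact ⟨h0, h26⟩
    | succ m ih =>
      intro x hx
      rw [Function.iterate_succ_apply'] at hx
      unfold pvSatF at hx
      rcases (PySem.Set.mem_union _ _ _).mp hx with h1 | h1
      · exact ih x h1
      · obtain ⟨p, hp, hpx⟩ := List.mem_map.mp h1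
        have := (hP p (List.mem_filter.mp hp).1).2
        omega
  have hlen : ∀ k, ((pvSatF P)^[k] (PySem.Set.ofList [s0])).length ≤ 26 := by
    intro k
    have hsub : (pvSatF P)^[k] (PySem.Set.ofList [s0]) ⊆ PySem.List.pyRange 0 26 1 := by
      intro x hx
      have := hbound k x hx
      exact (PySem.List.mem_pyRange_one).mpr ⟨this.1, this.2⟩
    have := ((hnodup k).subperm hsub).length_le
    rwa [PySem.List.length_pyRange_one] at this
  -- each step appends
  have happ : ∀ s : PySem.Set Int, ∃ t, pvSatF P s = s ++ t := by
    intro s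
    exact ⟨_, PySem.Set.update_eq_append_filter _ _⟩
  -- after 26 rounds the iteration is a fixpoint
  have hgrow : ∀ k, pvSatF P ((pvSatF P)^[k] (PySem.Set.ofList [s0])) = (pvSatF P)^[k] (PySem.Set.ofList [s0]) ∨
      k + 1 ≤ ((pvSatF P)^[k] (PySem.Set.ofList [s0])).length := by
    intro k
    induction k with
    | zero => right; simp [PySem.Set.ofList]
    | succ m ih =>
      rcases ih with hfix | hlen'
      · left
        rw [Function.iterate_succ_apply', hfix, hfix]
      · obtain ⟨t, ht⟩ := happ ((pvSatF P)^[m] (PySem.Set.ofList [s0]))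
        cases t with
        | nil =>
          left
          rw [Function.iterate_succ_apply']
          rw [List.append_nil] at ht
          rw [ht, ht]
        | cons y ys =>
          right
          rw [Function.iterate_succ_apply', ht]
          simp only [List.length_append, List.length_cons]
          omega
  have hfix : pvSatF P ((pvSatF P)^[26] (PySem.Set.ofList [s0])) = (pvSatF P)^[26] (PySem.Set.ofList [s0]) := by
    rcases hgrow 26 with h | h
    · exact h
    · exact absurd (hlen 26) (by omega)
  have hs0 : s0 ∈ (pvSatF P)^[26] (PySem.Set.ofList [s0]) := by
    have : ∀ k, s0 ∈ (pvSatF P)^[k] (PySem.Set.ofList [s0]) := by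
      intro k
      induction k with
      | zero => simp [PySem.Set.mem_ofList]
      | succ m ih =>
        rw [Function.iterate_succ_apply']
        unfold pvSatF
        exact (PySem.Set.mem_union _ _ _).mpr (Or.inl ih)
    exact this 26
  intro x hx
  induction hx with
  | refl => exact hs0
  | tail hab hbc ihp =>
    rename_i b c
    rw [← hfix]
    unfold pvSatF
    apply (PySem.Set.mem_union _ _ _).mpr
    right
    apply List.mem_map.mpr
    refine ⟨(b, c), List.mem_filter.mpr ⟨hbc, ?_⟩, rfl⟩
    exact (PySem.Set.contains_iff _ _).mpr ihp

-- ---- relating the two graph representations ----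
def pvGStep : PySem.Dict Int (List Int) → (Int × Int) → PySem.Dict Int (List Int) :=
  fun d p => d.modify p.1 [] (· ++ [p.2])

lemma pvAdj_mem (P : List (Int × Int)) (v u : Int) :
    u ∈ (P.foldl pvGStep PySem.Dict.empty).getD v [] ↔ (v, u) ∈ P := by
  unfold pvGStep
  rw [PySem.Dict.getD_foldl_modify_append]
  simp only [PySem.Dict.getD_empty, List.nil_append, List.mem_map, List.mem_filter, beq_iff_eq]
  constructor
  · rintro ⟨p, ⟨hp, h1⟩, h2⟩
    have : (v, u) = p := by
      rw [← h1, ← h2]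
    rw [this]
    exact hp
  · intro h
    exact ⟨(v, u), ⟨h, rfl⟩, rfl⟩

-- ---- the build loops ----
lemma pvFoldA (arr : List String) :
    ∀ (g : PySem.Dict Int (List Int)) (o i : List Int),
    arr.foldl (fun st w =>
      match PySem.Str.pyGet? w 0, PySem.Str.pyGet? w (-1) with
      | some c0, some c1 =>
        let s := pvA_c2i c0
        let e := pvA_c2i c1
        (st.1.modify s [] (· ++ [e]),
         PySem.List.pySetD st.2.1 s (PySem.List.pyGetD st.2.1 s 0 + 1),
         PySem.List.pySetD st.2.2 e (PySem.List.pyGetD st.2.2 e 0 + 1))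
      | _, _ => st) (g, o, i)
    = ((pvP arr).foldl pvGStep g,
       (pvP arr).foldl (fun o p => PySem.List.pySetD o p.1 (PySem.List.pyGetD o p.1 0 + 1)) o,
       (pvP arr).foldl (fun i p => PySem.List.pySetD i p.2 (PySem.List.pyGetD i p.2 0 + 1)) i) := by
  induction arr with
  | nil => intro g o i; rfl
  | cons w t ih =>
    intro g o i
    simp only [List.foldl_cons, pvP, List.filterMap_cons]
    rcases h0 : PySem.Str.pyGet? w 0 with _ | c0 <;> rcases h1 : PySem.Str.pyGet? w (-1) with _ | c1 <;>
      simp only [pvPair, h0, h1] <;> exact ih _ _ _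

lemma pvFoldB (arr : List String) :
    ∀ (o i : List Int) (e : List (Int × Int)),
    arr.foldl (fun st w =>
      match PySem.Str.pyGet? w 0 with
      | none => st
      | some c0 =>
        match PySem.Str.pyGet? w (-1) with
        | none => st
        | some c1 =>
          let s : Int := (c0.toNat : Int) - 97
          let e : Int := (c1.toNat : Int) - 97
          (PySem.List.pySetD st.1 s (PySem.List.pyGetD st.1 s 0 + 1),
           PySem.List.pySetD st.2.1 e (PySem.List.pyGetD st.2.1 e 0 + 1),
           st.2.2 ++ [(s, e)])) (o, i, e)
    = ((pvP arr).foldl (fun o p => PySem.List.pySetD o p.1 (PySem.List.pyGetD o p.1 0 + 1)) o,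
       (pvP arr).foldl (fun i p => PySem.List.pySetD i p.2 (PySem.List.pyGetD i p.2 0 + 1)) i,
       (pvP arr).foldl (fun l p => l ++ [p]) e) := by
  induction arr with
  | nil => intro o i e; rfl
  | cons w t ih =>
    intro o i e
    simp only [List.foldl_cons, pvP, List.filterMap_cons]
    rcases h0 : PySem.Str.pyGet? w 0 with _ | c0 <;> rcases h1 : PySem.Str.pyGet? w (-1) with _ | c1 <;>
      simp only [pvPair, h0, h1] <;> exact ih _ _ _

lemma pvLenOut (P : List (Int × Int)) :
    ∀ (o : List Int), ((P.foldl (fun o p => PySem.List.pySetD o p.1 (PySem.List.pyGetD o p.1 0 + 1)) o)).length = o.length := by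
  induction P with
  | nil => intro o; rfl
  | cons p t ih =>
    intro o
    simp only [List.foldl_cons]
    rw [ih, PySem.List.length_pySetD]

lemma pvLenIn (P : List (Int × Int)) :
    ∀ (o : List Int), ((P.foldl (fun i p => PySem.List.pySetD i p.2 (PySem.List.pyGetD i p.2 0 + 1)) o)).length = o.length := by
  induction P with
  | nil => intro o; rfl
  | cons p t ih =>
    intro o
    simp only [List.foldl_cons]
    rw [ih, PySem.List.length_pySetD]

lemma pvP_bounds (arr : List String) (hpre : Pre_isCircle arr) :
    ∀ p ∈ pvP arr, (0 ≤ p.1 ∧ p.1 < 26) ∧ (0 ≤ p.2 ∧ p.2 < 26) := by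
  intro p hp
  rw [pvP, List.mem_filterMap] at hp
  obtain ⟨w, hw, hpair⟩ := hp
  obtain ⟨hne, hhead, hlast⟩ := hpre w hw
  unfold pvPair at hpair
  rcases h0 : PySem.Str.pyGet? w 0 with _ | c0 <;> rw [h0] at hpair
  · cases hpair
  rcases h1 : PySem.Str.pyGet? w (-1) with _ | c1 <;> rw [h1] at hpair
  · cases hpair
  have hc0 : w.toList.head? = some c0 := by
    have := h0
    simp only [PySem.Str.pyGet?] at this
    rwa [PySem.Chars.pyGet?, PySem.List.pyGet?_zero, ← List.head?_eq_getElem?] at this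
  have hc1 : w.toList.getLast? = some c1 := by
    have := h1
    simp only [PySem.Str.pyGet?] at this
    rwa [PySem.Chars.pyGet?, PySem.List.pyGet?_neg_one] at this
  have hc0' : c0 = w.toList.headD 'a' := by
    cases hl : w.toList with
    | nil => exact absurd hl hne
    | cons a t => rw [hl] at hc0; cases hc0; rfl
  have hc1' : c1 = w.toList.getLastD 'a' := by
    rw [List.getLastD_eq_getLast?, hc1]; rfl
  rw [hc0'] at hpair
  rw [hc1'] at hpair
  unfold pvIsLower at hhead hlast
  have hh : 97 ≤ (w.toList.headD 'a').toNat ∧ (w.toList.headD 'a').toNat ≤ 122 := by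
    simpa using hhead
  have hl : 97 ≤ (w.toList.getLastD 'a').toNat ∧ (w.toList.getLastD 'a').toNat ≤ 122 := by
    simpa using hlast
  cases hpair
  unfold pvA_c2i
  constructor <;> constructor <;> omega

-- ---- balance test equivalence ----
lemma pvBalance (l1 l2 : List Int) (h1 : l1.length = 26) (h2 : l2.length = 26) :
    ((PySem.List.pyRange 0 26 1).any
      (fun i => decide (PySem.List.pyGetD l1 i 0 ≠ PySem.List.pyGetD l2 i 0)) = false) ↔ l1 = l2 := by
  rw [List.any_eq_false]
  constructor
  · intro h
    apply List.ext_getElem (h1.trans h2.symm)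
    intro n hn1 hn2
    have hmem : ((n : Nat) : Int) ∈ PySem.List.pyRange 0 26 1 :=
      (PySem.List.mem_pyRange_one).mpr ⟨by omega, by omega⟩
    have := h _ hmem
    rw [PySem.List.pyGetD_eq_getElem l1 0 (by omega) (by omega),
        PySem.List.pyGetD_eq_getElem l2 0 (by omega) (by omega)] at this
    simpa using this
  · intro h i _
    rw [h]
    simp

-- ---- main equivalence ----
theorem pvMain (arr : List String) (hpre : Pre_isCircle arr) : isCircle arr = isCircle_alt arr := by
  have hP := pvP_bounds arr hpre
  unfold isCircle isCircle_alt
  rw [pvFoldA, pvFoldB]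
  dsimp only
  rw [PySem.List.foldl_append_singleton, List.nil_append]
  set P := pvP arr with hPdef
  set OUTD := P.foldl (fun o p => PySem.List.pySetD o p.1 (PySem.List.pyGetD o p.1 0 + 1)) (List.replicate 26 (0:Int)) with hOUTD
  set IND := P.foldl (fun i p => PySem.List.pySetD i p.2 (PySem.List.pyGetD i p.2 0 + 1)) (List.replicate 26 (0:Int)) with hIND
  set GR := P.foldl pvGStep PySem.Dict.empty with hGR
  have hlo : OUTD.length = 26 := by rw [hOUTD, pvLenOut, List.length_replicate]
  have hli : IND.length = 26 := by rw [hIND, pvLenIn, List.length_replicate]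
  have hbal := pvBalance IND OUTD hli hlo
  by_cases hany : ((PySem.List.pyRange 0 26 1).any
      (fun i => decide (PySem.List.pyGetD IND i 0 ≠ PySem.List.pyGetD OUTD i 0))) = true
  · rw [if_pos hany, if_neg (fun he => by rw [← hbal] at he; rw [he] at hany; cases hany)]
  · rw [if_neg hany, if_pos (hbal.mp (Bool.not_eq_true _ ▸ hany))]
    rw [← List.head?_filter]
    cases hst : (PySem.List.pyRange 0 26 1).filter
        (fun i => decide (PySem.List.pyGetD OUTD i 0 > 0)) with
    | nil => rfl
    | cons s0 rest =>
      dsimp only [List.head?]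
      have hs0f : s0 ∈ (PySem.List.pyRange 0 26 1).filter
          (fun i => decide (PySem.List.pyGetD OUTD i 0 > 0)) := by
        rw [hst]; exact List.mem_cons_self ..
      have hs0r := (List.mem_filter.mp hs0f).1
      have hs0b : 0 ≤ s0 ∧ s0 < 26 := by
        have := (PySem.List.mem_pyRange_one).mp hs0r
        exact ⟨this.1, this.2⟩
      have hrel : ∀ a b : Int, b ∈ GR.getD a [] ↔ (a, b) ∈ P := fun a b => pvAdj_mem P a b
      have hg : ∀ v u, u ∈ GR.getD v [] → 0 ≤ u ∧ u < 26 :=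
        fun v u hu => (hP (v, u) ((hrel v u).mp hu)).2
      have hRGP : ∀ i, pvRG GR s0 i ↔ pvRP P s0 i := by
        intro i
        constructor
        · exact Relation.ReflTransGen.mono (fun a b hab => (hrel a b).mp hab)
        · exact Relation.ReflTransGen.mono (fun a b hab => (hrel a b).mpr hab)
      have hseen : (PySem.List.pyRange 0 26 1).foldl
          (fun seen _ => PySem.Set.union seen ((P.filter (fun p => PySem.Set.contains seen p.1)).map (·.2)))
          (PySem.Set.ofList [s0]) = (pvSatF P)^[26] (PySem.Set.ofList [s0]) := by
        rw [show (fun (seen : PySem.Set Int) (_ : Int) =>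
            PySem.Set.union seen ((P.filter (fun p => PySem.Set.contains seen p.1)).map (·.2)))
          = (fun s _ => pvSatF P s) from rfl]
        rw [List.foldl_const, PySem.List.length_pyRange_one]
        rfl
      rw [hseen]
      have hpoint : ∀ i : Int, i ∈ PySem.List.pyRange 0 26 1 →
          ((PySem.List.pyGetD (pvA_dfs GR 27 s0 (List.replicate 26 false)) i false = true) ↔
            (PySem.Set.contains ((pvSatF P)^[26] (PySem.Set.ofList [s0])) i = true)) := by
        intro i hi
        have hib := (PySem.List.mem_pyRange_one).mp hi
        obtain ⟨n, rfl⟩ : ∃ n : Nat, i = (n : Int) := ⟨i.toNat, (Int.toNat_of_nonneg hib.1).symm⟩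
        rw [PySem.List.pyGetD_natCast]
        have h1 := pvDfs_char GR hg s0 hs0b.1 hs0b.2 (n : Int) (by omega) hib.2
        rw [Int.toNat_natCast] at h1
        rw [h1, PySem.Set.contains_iff, hRGP]
        constructor
        · exact fun h => pvSat_complete P s0 hP hs0b.1 hs0b.2 (n : Int) h
        · exact fun h => pvSat_sound P s0 26 (n : Int) h
      by_cases hchk : ((PySem.List.pyRange 0 26 1).any fun i =>
          decide (PySem.List.pyGetD OUTD i 0 > 0) &&
            (PySem.List.pyGetD (pvA_dfs GR 27 s0 (List.replicate 26 false)) i false == false)) = true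
      · have hallf : ¬ ((s0 :: rest).all
            (fun i => PySem.Set.contains ((pvSatF P)^[26] (PySem.Set.ofList [s0])) i) = true) := by
          intro hall
          obtain ⟨i, hi, hcl⟩ := List.any_eq_true.mp hchk
          have hout : decide (PySem.List.pyGetD OUTD i 0 > 0) = true := ((Bool.and_eq_true _ _).mp hcl).1
          have hvf : PySem.List.pyGetD (pvA_dfs GR 27 s0 (List.replicate 26 false)) i false = false := by
            simpa using ((Bool.and_eq_true _ _).mp hcl).2
          have hifilter : i ∈ s0 :: rest := by
            rw [← hst]; exact List.mem_filter.mpr ⟨hi, hout⟩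
          have hcon := List.all_eq_true.mp hall i hifilter
          have := (hpoint i hi).mpr hcon
          rw [hvf] at this
          cases this
        rw [if_pos hchk, if_neg hallf]
      · rw [if_neg hchk, if_neg hchk, if_pos ?_]
        apply List.all_eq_true.mpr
        intro i hii
        have hif : i ∈ (PySem.List.pyRange 0 26 1).filter
            (fun i => decide (PySem.List.pyGetD OUTD i 0 > 0)) := hst ▸ hii
        have hi := (List.mem_filter.mp hif).1
        have hout := (List.mem_filter.mp hif).2
        apply (hpoint i hi).mp
        cases hvv : PySem.List.pyGetD (pvA_dfs GR 27 s0 (List.replicate 26 false)) i false with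
        | false =>
          exact absurd (List.any_eq_true.mpr ⟨i, hi, by rw [hout, hvv]; rfl⟩) hchk
        | true => rfl

-- ===== VERDICT (by name: the statement is the Claim_ definition above) =====
theorem isCircle_spec : Claim_equal_isCircle := by
  intro arr _ hpre
  unfold Spec_isCircle
  exact pvMain arr hpre
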